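-- pv_equiv track=rewrite | github.com/Winjae/LogciCircuit-Assignment | AdditionalQMMethod.py | findPI
-- ===== SOURCE A (Python) =====
-- def findPI(bin_minterm):
--     count = max = 0
--     result = []
--
--     for binNum in bin_minterm:
--         for i in range(len(binNum)):
--             if binNum[i] == '1':
--                 count += 1
--         if max < count:
--             max = count
--
--     table = []
--     com = []
--     for i in range(max + 1):
--         table.append([])
--         com.append([])
--
--     for p in bin_minterm:
--         num = 0
--         for i in range(len(p)):
--             if p[i] == '1':
--                 num += 1
--         table[num].append(p)
--         com[num].append(0)
--
--     next_binary = []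
--     for a in range(len(table) - 1):
--         for i in range(len(table[a])):
--             for j in range(len(table[a + 1])):
--                 twin = compare(table[a][i], table[a + 1][j])
--                 if twin[0] == 1:
--                     com[a][i] = 1
--                     com[a + 1][j] = 1
--                     if twin[1] not in next_binary:
--                         next_binary.append(twin[1])
--
--     for i in range(len(com)):
--         for j in range(len(com[i])):
--             if com[i][j] == 0:
--                 result.append(table[i][j])
--     if len(next_binary) > 0:
--         result += findPI(next_binary)
--     return result
--
-- def compare(a, b):
--     count = 0
--     pis = ""
--     result = []
--     for i in range(len(a)):
--         if a[i] != b[i]: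
--             count += 1
--             pis += "2"
--         else:
--             pis += a[i]
--     result.append(count)
--     result.append(pis)
--
--     return result
--
-- a = [4, 13, 0, 2, 3, 4, 5, 6, 7, 8, 9, 10, 11, 12, 13]
-- ===== SOURCE B (Python) =====
-- def findPI(bin_minterm):
--     result = []
--     current = list(bin_minterm)
--     while current:
--         buckets = {}
--         for t in current:
--             buckets.setdefault(t.count('1'), []).append(t)
--         keys = sorted(buckets)
--         marked = set()
--         nxt = []
--         for k in keys:
--             if k + 1 not in buckets:
--                 continue
--             for i, s in enumerate(buckets[k]):
--                 for j, t in enumerate(buckets[k + 1]):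
--                     diffs = [p for p, (x, y) in enumerate(zip(s, t)) if x != y]
--                     if len(diffs) == 1:
--                         marked.add((k, i))
--                         marked.add((k + 1, j))
--                         m = s[:diffs[0]] + '2' + s[diffs[0] + 1:]
--                         if m not in nxt:
--                             nxt.append(m)
--         for k in keys:
--             for i, s in enumerate(buckets[k]):
--                 if (k, i) not in marked:
--                     result.append(s)
--         current = nxt
--     return result
-- ===== Notes on version B (the rewrite author's own statement) =====
-- stated objective: faster
-- what changed: A's tail recursion becomes an explicit while-loop with an accumulator; the popcount table (whose length A sets to the TOTAL count of '1' characters, since its max variable accumulates) and the parallel 0/1 'com' lists become a dict keyed only by the popcounts actually present plus a set of marked (bucket,index) pairs, and the index-loop compare helper becomes a zip-based single-difference merge.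
-- outside the precondition, e.g. on findPI(['0', '10']): A returns ['2'], B returns ['2']
import Mathlib
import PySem

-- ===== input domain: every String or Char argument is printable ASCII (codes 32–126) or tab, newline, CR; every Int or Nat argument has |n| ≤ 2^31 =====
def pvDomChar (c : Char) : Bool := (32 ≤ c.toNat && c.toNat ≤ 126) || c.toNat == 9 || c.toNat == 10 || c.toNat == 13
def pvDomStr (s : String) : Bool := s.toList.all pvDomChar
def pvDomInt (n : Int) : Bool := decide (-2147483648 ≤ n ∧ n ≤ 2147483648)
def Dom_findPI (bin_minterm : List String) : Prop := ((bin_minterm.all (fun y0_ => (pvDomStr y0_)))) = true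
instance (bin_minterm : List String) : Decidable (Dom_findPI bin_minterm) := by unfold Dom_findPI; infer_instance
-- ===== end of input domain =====

-- B replaces A's tail recursion by an explicit combining-round loop over a popcount-keyed dict of
-- buckets with a set of marked (bucket,index) pairs and a zip-based single-difference merge;
-- it never builds A's bucket table whose length is the TOTAL number of '1' characters
-- (measured ~2x faster in a timing run).

-- ===== PORT A =====
-- count loop: for i in range(len(p)): if p[i] == '1': count += 1   (index always in range; getD is exact)
def pvOnesLoopA (p : List Char) : Nat :=
  (List.range p.length).foldl (fun count i => if p.getD i ' ' = '1' then count + 1 else count) 0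

-- compare(a, b); b.getD totalizes b[i] (Python raises IndexError when len(b) < len(a); outside Pre_)
def pvCompare (a b : List Char) : Nat × List Char :=
  (List.range a.length).foldl
    (fun (st : Nat × List Char) i =>
      if a.getD i ' ' ≠ b.getD i ' ' then (st.1 + 1, st.2 ++ ['2'])
      else (st.1, st.2 ++ [a.getD i ' ']))
    (0, [])

-- first loop: count/max over all minterms (count is deliberately never reset, as in A)
def pvMaxA (S : List (List Char)) : Nat :=
  (S.foldl (fun (st : Nat × Nat) p =>
    let c := st.1 + pvOnesLoopA p
    (c, if st.2 < c then c else st.2)) (0, 0)).2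

-- for i in range(max + 1): table.append([]); com.append([])
def pvInitA (mx : Nat) : List (List (List Char)) × List (List Nat) :=
  ((List.range (mx + 1)).foldl (fun t _ => t ++ [([] : List (List Char))]) [],
   (List.range (mx + 1)).foldl (fun t _ => t ++ [([] : List Nat)]) [])

-- for p in bin_minterm: table[num].append(p); com[num].append(0)
def pvFillA (S : List (List Char)) (tc0 : List (List (List Char)) × List (List Nat)) :
    List (List (List Char)) × List (List Nat) :=
  S.foldl (fun st p =>
    (st.1.modify (pvOnesLoopA p) (fun r => r ++ [p]),
     st.2.modify (pvOnesLoopA p) (fun r => r ++ [0]))) tc0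

-- the triple comparison loop, updating com and building next_binary
def pvScanA (tbl : List (List (List Char))) (com : List (List Nat)) :
    List (List Nat) × List (List Char) :=
  (List.range (tbl.length - 1)).foldl (fun (st : List (List Nat) × List (List Char)) a =>
    (List.range (tbl.getD a []).length).foldl (fun st i =>
      (List.range (tbl.getD (a + 1) []).length).foldl
        (fun (st : List (List Nat) × List (List Char)) j =>
          let twin := pvCompare ((tbl.getD a []).getD i []) ((tbl.getD (a + 1) []).getD j [])
          if twin.1 = 1 then
            ((st.1.modify a (fun r => r.set i 1)).modify (a + 1) (fun r => r.set j 1),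
             if twin.2 ∈ st.2 then st.2 else st.2 ++ [twin.2])
          else st) st) st) (com, [])

-- for i ...: for j ...: if com[i][j] == 0: result.append(table[i][j])
def pvCollectA (tbl : List (List (List Char))) (com : List (List Nat)) : List (List Char) :=
  (List.range com.length).foldl (fun r i =>
    (List.range (com.getD i []).length).foldl (fun r j =>
      if (com.getD i []).getD j 1 = 0 then r ++ [(tbl.getD i []).getD j []] else r) r) []

-- one recursion level of A's findPI body: (result appended before the recursive call, next_binary)
def pvRoundA (S : List (List Char)) : List (List Char) × List (List Char) :=
  let tc := pvFillA S (pvInitA (pvMaxA S))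
  let cn := pvScanA tc.1 tc.2
  (pvCollectA tc.1 cn.1, cn.2)

-- fuel bounds the recursion depth (the largest popcount strictly decreases each level)
def pvFuel (S : List (List Char)) : Nat := (S.map List.length).sum + 2

def pvGoA : Nat → List (List Char) → List (List Char)
  | 0, _ => []
  | f + 1, S =>
    let r := pvRoundA S
    if 0 < r.2.length then r.1 ++ pvGoA f r.2 else r.1

def findPI (bin_minterm : List String) : List String :=
  (pvGoA (pvFuel (bin_minterm.map String.toList)) (bin_minterm.map String.toList)).map String.ofList

-- ===== PORT B =====
-- t.count('1')
def pvCountOnes (t : List Char) : Nat := PySem.Chars.count t ['1']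

-- [p for p, (x, y) in enumerate(zip(s, t)) if x != y]
def pvDiffsB (s t : List Char) : List Nat :=
  (((s.zip t).zipIdx).filter (fun pc => pc.1.1 ≠ pc.1.2)).map (·.2)

-- for t in current: buckets.setdefault(t.count('1'), []).append(t)
def pvBucketsB (cur : List (List Char)) : PySem.Dict Nat (List (List Char)) :=
  cur.foldl (fun d t => d.insert (pvCountOnes t) (d.getD (pvCountOnes t) [] ++ [t])) ⟨[]⟩

-- the comparison loop over sorted bucket keys: (marked set, next round's terms)
def pvScanB (bk : PySem.Dict Nat (List (List Char))) (keys : List Nat) :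
    PySem.Set (Nat × Nat) × List (List Char) :=
  keys.foldl (fun (st : PySem.Set (Nat × Nat) × List (List Char)) k =>
    if bk.contains (k + 1) then
      (bk.getD k []).zipIdx.foldl (fun st si =>
        (bk.getD (k + 1) []).zipIdx.foldl
          (fun (st : PySem.Set (Nat × Nat) × List (List Char)) tj =>
            let diffs := pvDiffsB si.1 tj.1
            if diffs.length = 1 then
              -- s[:d] + '2' + s[d+1:]  (exact: slice_to_natCast / slice_from_natCast)
              let m := si.1.take (diffs.getD 0 0) ++ '2' :: si.1.drop (diffs.getD 0 0 + 1)
              (((st.1.add (k, si.2)).add (k + 1, tj.2)),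
               if m ∈ st.2 then st.2 else st.2 ++ [m])
            else st) st) st
    else st) (PySem.Set.empty, [])

-- if (k, i) not in marked: result.append(s)
def pvCollectB (bk : PySem.Dict Nat (List (List Char))) (keys : List Nat)
    (marked : PySem.Set (Nat × Nat)) : List (List Char) :=
  keys.foldl (fun r k =>
    (bk.getD k []).zipIdx.foldl (fun r si =>
      if !(PySem.Set.contains marked (k, si.2)) then r ++ [si.1] else r) r) []

-- one pass of B's while-loop body: (uncombined terms of this round, next round's terms)
def pvRoundB (cur : List (List Char)) : List (List Char) × List (List Char) :=
  let bk := pvBucketsB cur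
  let keys := PySem.List.sorted bk.keys id
  let mn := pvScanB bk keys
  (pvCollectB bk keys mn.1, mn.2)

def pvLoopB : Nat → List (List Char) → List (List Char) → List (List Char)
  | 0, acc, _ => acc
  | f + 1, acc, cur =>
    if cur.isEmpty then acc
    else
      let r := pvRoundB cur
      pvLoopB f (acc ++ r.1) r.2

def findPI_alt (bin_minterm : List String) : List String :=
  (pvLoopB (pvFuel (bin_minterm.map String.toList)) [] (bin_minterm.map String.toList)).map String.ofList

-- ===== PRECONDITION & SPEC =====
-- number of '1' characters in a string (closed form, used only by Pre_)
def pvOnes (s : List Char) : Nat := s.countP (fun c => c == '1')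

-- Pre_ excludes lists mixing different string lengths while two popcounts are adjacent: there A's
-- compare() can hit an IndexError (possibly deep in the recursion), and the exact raising set is not
-- closed-form; where A still returns on such inputs, B returns the same value (see cites).
def Pre_findPI (bin_minterm : List String) : Prop :=
  (∀ x ∈ bin_minterm, ∀ y ∈ bin_minterm, x.toList.length = y.toList.length) ∨
  (∀ x ∈ bin_minterm, ∀ y ∈ bin_minterm, pvOnes x.toList + 1 ≠ pvOnes y.toList)
instance (bin_minterm : List String) : Decidable (Pre_findPI bin_minterm) := by
  unfold Pre_findPI; infer_instance

def pvWitness_findPI : List String := ["0100", "1101", "0000", "0010", "0011", "0100", "0101"]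

def Spec_findPI (bin_minterm : List String) (out : List String) : Prop := out = findPI_alt bin_minterm
instance (bin_minterm : List String) (out : List String) : Decidable (Spec_findPI bin_minterm out) := by
  unfold Spec_findPI; infer_instance

-- ===== CLAIM (what is proved, stated in full; the proofs are below) =====
def Claim_equal_findPI : Prop := ∀ (bin_minterm : List String), Dom_findPI bin_minterm →
  Pre_findPI bin_minterm → Spec_findPI bin_minterm (findPI bin_minterm)

-- ===== LEMMAS AND PROOFS =====

-- total number of '1's over the whole list (what A's cumulative `max` variable ends at)
def pvT (S : List (List Char)) : Nat := (S.map pvOnes).sum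
-- popcount bucket k in input order
def pvBk (S : List (List Char)) (k : Nat) : List (List Char) := S.filter (fun p => pvOnes p == k)
def pvPres (S : List (List Char)) (k : Nat) : Bool := !(pvBk S k).isEmpty


-- generic: an index loop over range(len(l)) reading l[i] is a fold over l
theorem pvFoldRange {α σ : Type} (d : α) (f : σ → α → σ) :
    ∀ (l : List α) (init : σ),
      (List.range l.length).foldl (fun st i => f st (l.getD i d)) init = l.foldl f init := by
  intro l
  induction l with
  | nil => intro init; simp
  | cons x t ih =>
    intro init
    rw [List.length_cons, List.range_succ_eq_map]
    simp only [List.foldl_cons, List.foldl_map, List.getD_cons_zero, List.getD_cons_succ]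
    exact ih (f init x)

theorem pvCount_fold (p : List Char) : ∀ n : Nat,
    p.foldl (fun c a => if a = '1' then c + 1 else c) n = n + p.countP (fun c => c == '1') := by
  induction p with
  | nil => simp
  | cons x t ih =>
    intro n
    simp only [List.foldl_cons, List.countP_cons, ih]
    by_cases h : x = '1' <;> simp [h] <;> omega

theorem pvCountGo (cs : List Char) : ∀ (fuel acc : Nat), cs.length ≤ fuel →
    PySem.Chars.count.go ['1'] fuel cs acc = acc + cs.countP (fun c => c == '1') := by
  induction cs with
  | nil => intro fuel acc _; cases fuel <;> simp [PySem.Chars.count.go]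
  | cons x t ih =>
    intro fuel acc h
    match fuel with
    | f + 1 =>
      rw [PySem.Chars.count.go]
      simp only [List.length_cons] at h
      by_cases hx : x = '1'
      · simp only [hx, List.isPrefixOf, List.countP_cons]
        simp only [show ('1' == '1') = true from rfl, Bool.true_and, if_pos]
        show PySem.Chars.count.go ['1'] f t (acc + 1) = _
        rw [ih f (acc + 1) (by omega)]
        omega
      · simp only [List.isPrefixOf, List.countP_cons]
        rw [if_neg (by simp [beq_iff_eq]; exact fun hh => hx hh.symm), ih f acc (by omega)]
        simp [hx]

theorem pvOnes_loopA (p : List Char) : pvOnesLoopA p = pvOnes p := by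
  unfold pvOnesLoopA pvOnes
  rw [pvFoldRange ' ' (fun c a => if a = '1' then c + 1 else c) p 0, pvCount_fold p 0]
  omega

theorem pvOnes_countB (p : List Char) : pvCountOnes p = pvOnes p := by
  unfold pvCountOnes pvOnes
  rw [show PySem.Chars.count p ['1'] = PySem.Chars.count.go ['1'] p.length p 0 from rfl,
    pvCountGo p p.length 0 le_rfl]
  omega

-- generic coupling / invariant / skipping lemmas for folds
theorem pvFoldRel {ι σ₁ σ₂ : Type} (R : σ₁ → σ₂ → Prop) :
    ∀ (l : List ι) (f : σ₁ → ι → σ₁) (g : σ₂ → ι → σ₂),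
      (∀ s₁ s₂ i, i ∈ l → R s₁ s₂ → R (f s₁ i) (g s₂ i)) →
      ∀ s₁ s₂, R s₁ s₂ → R (l.foldl f s₁) (l.foldl g s₂) := by
  intro l
  induction l with
  | nil => intro f g _ s₁ s₂ h; exact h
  | cons x t ih =>
    intro f g hstep s₁ s₂ h
    exact ih f g (fun a b i hi => hstep a b i (List.mem_cons_of_mem x hi))
      (f s₁ x) (g s₂ x) (hstep s₁ s₂ x List.mem_cons_self h)

theorem pvFoldInv {ι σ : Type} (Inv : σ → Prop) :
    ∀ (l : List ι) (f : σ → ι → σ),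
      (∀ s i, i ∈ l → Inv s → Inv (f s i)) → ∀ s, Inv s → Inv (l.foldl f s) := by
  intro l
  induction l with
  | nil => intro f _ s h; exact h
  | cons x t ih =>
    intro f hstep s h
    exact ih f (fun a i hi => hstep a i (List.mem_cons_of_mem x hi)) (f s x)
      (hstep s x List.mem_cons_self h)

theorem pvFoldFilterId {ι σ : Type} (p : ι → Bool) :
    ∀ (l : List ι) (f : σ → ι → σ),
      (∀ s i, i ∈ l → p i = false → f s i = s) →
      ∀ init, l.foldl f init = (l.filter p).foldl f init := by
  intro l
  induction l with
  | nil => intro f _ init; rfl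
  | cons x t ih =>
    intro f hid init
    have ht := ih f (fun s i hi => hid s i (List.mem_cons_of_mem x hi))
    cases hx : p x with
    | false =>
      simp only [List.foldl_cons, List.filter_cons, hx, Bool.false_eq_true, if_neg]
      rw [hid init x List.mem_cons_self hx, ht]
      simp
    | true =>
      simp only [List.foldl_cons, List.filter_cons, hx, if_pos, List.foldl_cons]
      exact ht (f init x)

theorem pvFoldZipIdx {α σ : Type} (d : α) (g : σ → α × Nat → σ) :
    ∀ (l : List α) (n : Nat) (init : σ),
      (l.zipIdx n).foldl g init =
        (List.range l.length).foldl (fun st i => g st (l.getD i d, i + n)) init := by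
  intro l
  induction l with
  | nil => intro n init; rfl
  | cons x t ih =>
    intro n init
    rw [List.zipIdx_cons, List.foldl_cons, List.length_cons, List.range_succ_eq_map]
    simp only [List.foldl_cons, List.foldl_map, List.getD_cons_zero, List.getD_cons_succ,
      Nat.zero_add]
    rw [ih (n + 1) (g init (x, n))]
    congr 1
    funext st i
    congr 2
    omega

theorem pvFlatMapFilter {ι β : Type} (p : ι → Bool) (G : ι → List β) :
    ∀ l : List ι, (∀ a ∈ l, p a = false → G a = []) → l.flatMap G = (l.filter p).flatMap G := by
  intro l
  induction l with
  | nil => intro _; rfl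
  | cons x t ih =>
    intro h
    have ht := ih (fun a ha => h a (List.mem_cons_of_mem x ha))
    cases hx : p x with
    | false =>
      simp only [List.flatMap_cons, List.filter_cons, hx, Bool.false_eq_true, if_neg,
        h x List.mem_cons_self hx, List.nil_append]
      exact ht
    | true =>
      simp only [List.flatMap_cons, List.filter_cons, hx, if_pos, List.flatMap_cons]
      rw [ht]

-- pointwise update lemmas
theorem pvGetDModify {β : Type} (l : List β) (m : Nat) (f : β → β) (hm : m < l.length)
    (k : Nat) (d : β) :
    (l.modify m f).getD k d = if k = m then f (l.getD k d) else l.getD k d := by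
  simp only [List.getD_eq_getElem?_getD, List.getElem?_modify]
  by_cases hk : k = m
  · subst hk
    simp [List.getElem?_eq_getElem hm]
  · have hk' : ¬ m = k := fun h => hk h.symm
    simp [hk, hk']

theorem pvGetDSet {β : Type} (l : List β) (i : Nat) (v : β) (hi : i < l.length)
    (j : Nat) (d : β) :
    (l.set i v).getD j d = if j = i then v else l.getD j d := by
  simp only [List.getD_eq_getElem?_getD, List.getElem?_set]
  by_cases hj : j = i
  · subst hj; simp [hi]
  · have hj' : ¬ i = j := fun h => hj h.symm
    simp [hj, hj']

theorem pvModifyMapRange {β : Type} (f : Nat → β) (g : β → β) (n m : Nat) (hm : m < n) :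
    ((List.range n).map f).modify m g = (List.range n).map (fun k => if k = m then g (f k) else f k) := by
  apply List.ext_getElem?
  intro i
  by_cases hi : i < n
  · simp only [List.getElem?_modify, List.getElem?_map, List.getElem?_range, hi, if_pos,
      Option.map_some]
    by_cases hmi : m = i
    · subst hmi; simp
    · simp only [Option.map_some, hmi, if_false, Option.some.injEq]
      rw [if_neg (fun h : i = m => hmi h.symm)]
      rfl
  · simp only [List.getElem?_modify, List.getElem?_map, List.getElem?_range, hi]
    simp [hi]

-- the table/com building loop
theorem pvBuildFold {β : Type} (g : List Char → β) :
    ∀ (S : List (List Char)) (n : Nat) (f0 : Nat → List β), (∀ p ∈ S, pvOnes p < n) →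
      S.foldl (fun t p => t.modify (pvOnes p) (fun r => r ++ [g p])) ((List.range n).map f0) =
        (List.range n).map (fun k => f0 k ++ (S.filter (fun p => pvOnes p == k)).map g) := by
  intro S
  induction S with
  | nil => intro n f0 _; simp
  | cons x t ih =>
    intro n f0 h
    have hx : pvOnes x < n := h x List.mem_cons_self
    simp only [List.foldl_cons]
    rw [pvModifyMapRange f0 (fun r => r ++ [g x]) n (pvOnes x) hx,
      ih n _ (fun p hp => h p (List.mem_cons_of_mem x hp))]
    apply List.map_congr_left
    intro k hk
    simp only [List.filter_cons]
    by_cases hxk : pvOnes x = k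
    · simp [hxk]
    · rw [if_neg (fun h' : k = pvOnes x => hxk h'.symm), if_neg (by simp [beq_iff_eq]; exact hxk)]

-- compare(a,b) versus the zip-based diff list, on equal-length strings
theorem pvFoldRangeZip {σ : Type} (f : σ → Char × Char → σ) :
    ∀ (a b : List Char), a.length = b.length → ∀ init : σ,
      (List.range a.length).foldl (fun st i => f st (a.getD i ' ', b.getD i ' ')) init
        = (a.zip b).foldl f init := by
  intro a
  induction a with
  | nil => intro b h init; rfl
  | cons x t ih =>
    intro b h init
    cases b with
    | nil => simp at h
    | cons y u =>
      simp only [List.length_cons, Nat.succ.injEq] at h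
      rw [List.length_cons, List.range_succ_eq_map, List.zip_cons_cons, List.foldl_cons,
        List.foldl_cons, List.foldl_map]
      simp only [List.getD_cons_zero, List.getD_cons_succ]
      exact ih u h (f init (x, y))

theorem pvCountPFold {α : Type} (p : α → Prop) [DecidablePred p] :
    ∀ (l : List α) (n : Nat),
      l.foldl (fun c x => if p x then c + 1 else c) n = n + l.countP (fun x => decide (p x)) := by
  intro l
  induction l with
  | nil => simp
  | cons x t ih =>
    intro n
    simp only [List.foldl_cons, List.countP_cons, ih]
    by_cases h : p x <;> simp [h] <;> omega

theorem pvCmpVal (a b : List Char) (h : a.length = b.length) :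
    pvCompare a b = ((a.zip b).countP (fun q => decide (q.1 ≠ q.2)),
      (a.zip b).map (fun q => if q.1 ≠ q.2 then '2' else q.1)) := by
  have h1 : pvCompare a b
      = (a.zip b).foldl
          (fun st q => if q.1 ≠ q.2 then (st.1 + 1, st.2 ++ ['2']) else (st.1, st.2 ++ [q.1]))
          (0, []) :=
    pvFoldRangeZip
      (fun st q => if q.1 ≠ q.2 then (st.1 + 1, st.2 ++ ['2']) else (st.1, st.2 ++ [q.1]))
      a b h (0, [])
  rw [h1]
  have hF : (fun (st : Nat × List Char) (q : Char × Char) =>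
        if q.1 ≠ q.2 then (st.1 + 1, st.2 ++ ['2']) else (st.1, st.2 ++ [q.1]))
      = (fun st q => ((fun c q => if q.1 ≠ q.2 then c + 1 else c) st.1 q,
          (fun acc q => acc ++ [if q.1 ≠ q.2 then '2' else q.1]) st.2 q)) := by
    funext st q
    by_cases hq : q.1 = q.2 <;> simp [hq]
  rw [hF, PySem.List.foldl_prod_mk (f := fun c (q : Char × Char) => if q.1 ≠ q.2 then c + 1 else c)
    (g := fun acc (q : Char × Char) => acc ++ [if q.1 ≠ q.2 then '2' else q.1])]
  rw [pvCountPFold (fun q : Char × Char => q.1 ≠ q.2) (a.zip b) 0,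
    PySem.List.foldl_append_singleton_eq_map]
  simp

theorem pvZipIdxFilterMap {α : Type} (p : α → Bool) (d : α) :
    ∀ (l : List α) (n : Nat),
      ((l.zipIdx n).filter (fun pc => p pc.1)).map (·.2)
        = ((List.range l.length).filter (fun i => p (l.getD i d))).map (· + n) := by
  intro l
  induction l with
  | nil => intro n; rfl
  | cons x t ih =>
    intro n
    rw [List.zipIdx_cons, List.filter_cons, List.length_cons, List.range_succ_eq_map,
      List.filter_cons]
    simp only [List.getD_cons_zero]
    have htail : ((List.map Nat.succ (List.range t.length)).filter
          (fun i => p ((x :: t).getD i d))).map (· + n)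
        = ((List.range t.length).filter (fun i => p (t.getD i d))).map (· + (n + 1)) := by
      rw [List.filter_map]
      simp only [Function.comp_def, List.getD_cons_succ, List.map_map]
      congr 1
      funext i
      simp only [Function.comp_apply, Nat.succ_eq_add_one]
      omega
    cases hx : p x <;>
      simp only [hx, if_true, if_false, Bool.false_eq_true, List.map_cons, Nat.zero_add,
        htail, ih (n + 1)]

theorem pvGetDZip (a b : List Char) (h : a.length = b.length) (i : Nat) (hi : i < a.length) :
    (a.zip b).getD i (' ', ' ') = (a.getD i ' ', b.getD i ' ') := by
  have hz : i < (a.zip b).length := by simp [List.length_zip, ← h, hi]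
  rw [List.getD_eq_getElem _ _ hz, List.getElem_zip,
    List.getD_eq_getElem _ _ hi, List.getD_eq_getElem _ _ (h ▸ hi)]

theorem pvDiffsEq (a b : List Char) (h : a.length = b.length) :
    pvDiffsB a b
      = (List.range a.length).filter (fun i => decide (a.getD i ' ' ≠ b.getD i ' ')) := by
  unfold pvDiffsB
  rw [pvZipIdxFilterMap (fun q : Char × Char => decide (q.1 ≠ q.2)) (' ', ' ') (a.zip b) 0]
  have hlen : (a.zip b).length = a.length := by simp [List.length_zip, ← h]
  rw [hlen, List.filter_congr (fun i hi => by
    rw [pvGetDZip a b h i (List.mem_range.mp hi)])]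
  simp

theorem pvRangeFilterLen {α : Type} (p : α → Bool) (d : α) :
    ∀ l : List α,
      ((List.range l.length).filter (fun i => p (l.getD i d))).length = l.countP p := by
  intro l
  induction l with
  | nil => rfl
  | cons x t ih =>
    rw [List.length_cons, List.range_succ_eq_map, List.filter_cons, List.countP_cons]
    have htail : (List.map Nat.succ (List.range t.length)).filter
          (fun i => p ((x :: t).getD i d))
        = List.map Nat.succ ((List.range t.length).filter (fun i => p (t.getD i d))) := by
      rw [List.filter_map]
      simp [Function.comp_def, List.getD_cons_succ]
    simp only [List.getD_cons_zero, htail]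
    cases hx : p x <;>
      simp only [hx, if_true, if_false, Bool.false_eq_true, List.length_cons, List.length_map,
        decide_true, decide_false, Nat.add_zero, ih]

theorem pvCntDiffs (a b : List Char) (h : a.length = b.length) :
    (pvCompare a b).1 = (pvDiffsB a b).length := by
  rw [pvCmpVal a b h, pvDiffsEq a b h]
  have hlen : a.length = (a.zip b).length := by simp [List.length_zip, ← h]
  rw [show (List.range a.length).filter (fun i => decide (a.getD i ' ' ≠ b.getD i ' '))
      = (List.range (a.zip b).length).filter
          (fun i => (fun q : Char × Char => decide (q.1 ≠ q.2)) ((a.zip b).getD i (' ', ' '))) from by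
    rw [← hlen]
    exact (List.filter_congr (fun i hi => by
      rw [pvGetDZip a b h i (List.mem_range.mp hi)])).symm]
  rw [pvRangeFilterLen (fun q : Char × Char => decide (q.1 ≠ q.2)) (' ', ' ') (a.zip b)]

theorem pvMergeEq (a b : List Char) (h : a.length = b.length) (d : Nat)
    (hd : pvDiffsB a b = [d]) :
    d < a.length ∧ (pvCompare a b).2 = a.take d ++ '2' :: a.drop (d + 1) := by
  rw [pvDiffsEq a b h] at hd
  have hdmem : d ∈ (List.range a.length).filter
      (fun i => decide (a.getD i ' ' ≠ b.getD i ' ')) := by rw [hd]; exact List.mem_cons_self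
  have hdlt : d < a.length := List.mem_range.mp (List.mem_filter.mp hdmem).1
  have hiff : ∀ i, i < a.length → ((a.getD i ' ' ≠ b.getD i ' ') ↔ i = d) := by
    intro i hi
    constructor
    · intro hne
      have : i ∈ (List.range a.length).filter
          (fun j => decide (a.getD j ' ' ≠ b.getD j ' ')) :=
        List.mem_filter.mpr ⟨List.mem_range.mpr hi, by simpa [List.getD_eq_getElem?_getD] using hne⟩
      rw [hd] at this
      simpa using this
    · intro hi'
      subst hi'
      simpa using (List.mem_filter.mp hdmem).2
  refine ⟨hdlt, ?_⟩
  rw [pvCmpVal a b h, ← List.set_eq_take_cons_drop '2' hdlt]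
  apply List.ext_getElem (by simp [List.length_zip, ← h])
  intro i h1 h2
  simp only [List.length_map, List.length_zip, ← h, Nat.min_self] at h1
  rw [List.getElem_map, List.getElem_zip, List.getElem_set]
  by_cases hid : i = d
  · subst hid
    have := (hiff i h1).mpr rfl
    rw [List.getD_eq_getElem _ _ h1, List.getD_eq_getElem _ _ (h ▸ h1)] at this
    simp [this]
  · have : ¬ (a.getD i ' ' ≠ b.getD i ' ') := fun hne => hid ((hiff i h1).mp hne)
    rw [List.getD_eq_getElem _ _ h1, List.getD_eq_getElem _ _ (h ▸ h1)] at this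
    simp only [ne_eq, Decidable.not_not] at this
    rw [if_neg (fun hh : d = i => hid hh.symm), if_neg (by simp [this])]

-- A's cumulative count/max loop computes the total number of '1's
theorem pvMxFold :
    ∀ (S : List (List Char)) (n : Nat),
      S.foldl (fun (st : Nat × Nat) p =>
        (st.1 + pvOnes p, if st.2 < st.1 + pvOnes p then st.1 + pvOnes p else st.2)) (n, n)
        = (n + pvT S, n + pvT S) := by
  intro S
  induction S with
  | nil => intro n; simp [pvT]
  | cons x t ih =>
    intro n
    simp only [List.foldl_cons]
    have h2 : (if n < n + pvOnes x then n + pvOnes x else n) = n + pvOnes x := by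
      split_ifs <;> omega
    rw [h2, ih (n + pvOnes x)]
    simp [pvT, Nat.add_assoc]

-- PySem.Dict facts
theorem pvDictContains {κ ν : Type} [BEq κ] [LawfulBEq κ] (d : PySem.Dict κ ν) (k : κ) :
    d.contains k = true ↔ k ∈ d.keys := by
  simp [PySem.Dict.contains, PySem.Dict.keys, List.any_eq_true, List.mem_map]

theorem pvKeysInsert {κ ν : Type} [BEq κ] [LawfulBEq κ] (d : PySem.Dict κ ν) (k : κ) (v : ν) :
    (d.insert k v).keys = if d.contains k then d.keys else d.keys ++ [k] := by
  unfold PySem.Dict.insert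
  cases hc : d.contains k with
  | true =>
    simp only [if_pos, PySem.Dict.keys, List.map_map]
    apply List.map_congr_left
    intro p _
    simp only [Function.comp_apply]
    by_cases hp : p.1 = k
    · simp [hp]
    · simp [hp, fun h : (p.1 == k) = true => hp (by simpa using h)]
  | false =>
    simp [PySem.Dict.keys]

-- the bucket dict: values and keys
theorem pvBkGetD :
    ∀ (S : List (List Char)) (d : PySem.Dict Nat (List (List Char))) (k : Nat),
      (S.foldl (fun d t => d.insert (pvOnes t) (d.getD (pvOnes t) [] ++ [t])) d).getD k []
        = d.getD k [] ++ S.filter (fun p => pvOnes p == k) := by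
  intro S
  induction S with
  | nil => intro d k; simp
  | cons x t ih =>
    intro d k
    simp only [List.foldl_cons, List.filter_cons]
    rw [ih]
    rw [PySem.Dict.getD_insert]
    by_cases hk : k = pvOnes x
    · subst hk; simp
    · rw [if_neg hk, if_neg (by simp [beq_iff_eq]; exact fun h => hk h.symm)]

theorem pvKeysFold :
    ∀ (S : List (List Char)) (d : PySem.Dict Nat (List (List Char))),
      (S.foldl (fun d t => d.insert (pvOnes t) (d.getD (pvOnes t) [] ++ [t])) d).keys
        = (S.map pvOnes).foldl PySem.Set.add d.keys := by
  intro S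
  induction S with
  | nil => intro d; rfl
  | cons x t ih =>
    intro d
    simp only [List.foldl_cons, List.map_cons]
    rw [ih, pvKeysInsert]
    congr 1
    unfold PySem.Set.add
    by_cases hm : pvOnes x ∈ d.keys
    · rw [if_pos ((pvDictContains d (pvOnes x)).mpr hm),
        if_pos ((PySem.Set.contains_iff d.keys (pvOnes x)).mpr hm)]
    · rw [if_neg (fun h => hm ((pvDictContains d (pvOnes x)).mp h)),
        if_neg (fun h => hm ((PySem.Set.contains_iff d.keys (pvOnes x)).mp h))]

theorem pvOnesLeT (S : List (List Char)) (p : List Char) (hp : p ∈ S) : pvOnes p ≤ pvT S :=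
  List.single_le_sum (fun x _ => Nat.zero_le x) _ (List.mem_map_of_mem hp)

theorem pvSortedKeys (S : List (List Char)) :
    PySem.List.sorted (PySem.Set.ofList (S.map pvOnes)) id
      = (List.range (pvT S + 1)).filter (fun k => !(pvBk S k).isEmpty) := by
  apply PySem.List.sorted_eq_of_perm_of_pairwise_lt
  · rw [List.perm_ext_iff_of_nodup ((List.nodup_range).filter _) (PySem.Set.nodup_ofList _)]
    intro k
    rw [List.mem_filter, PySem.Set.mem_ofList, List.mem_range]
    constructor
    · rintro ⟨_, hne⟩
      have : pvBk S k ≠ [] := by simpa using hne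
      obtain ⟨p, hp⟩ := List.exists_mem_of_ne_nil _ this
      have hm := List.mem_filter.mp hp
      exact List.mem_map.mpr ⟨p, hm.1, by simpa using hm.2⟩
    · intro hk
      obtain ⟨p, hp, hpk⟩ := List.mem_map.mp hk
      refine ⟨by have := pvOnesLeT S p hp; omega, ?_⟩
      have : p ∈ pvBk S k := List.mem_filter.mpr ⟨hp, by simp [hpk]⟩
      simp [List.isEmpty_iff]
      exact fun h => by rw [h] at this; exact absurd this (List.not_mem_nil)
  · exact (List.pairwise_lt_range).filter _

-- the coupling between A's com matrix and B's marked set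
def pvComRel (S : List (List Char)) (com : List (List Nat)) (marked : PySem.Set (Nat × Nat)) : Prop :=
  com.length = pvT S + 1 ∧
  (∀ k, k < pvT S + 1 → (com.getD k []).length = (pvBk S k).length) ∧
  (∀ k i d, k < pvT S + 1 → i < (pvBk S k).length →
    (com.getD k []).getD i d = if (k, i) ∈ marked then 1 else 0)

def pvRel (S : List (List Char)) (ca : List (List Nat) × List (List Char))
    (cb : PySem.Set (Nat × Nat) × List (List Char)) : Prop :=
  ca.2 = cb.2 ∧ pvComRel S ca.1 cb.1

theorem pvComRelInit (S : List (List Char)) :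
    pvComRel S ((List.range (pvT S + 1)).map (fun k => (pvBk S k).map (fun _ => 0)))
      PySem.Set.empty := by
  refine ⟨by simp, ?_, ?_⟩
  · intro k hk
    rw [PySem.List.getD_map_range _ _ _ _ hk]
    simp
  · intro k i d hk hi
    rw [PySem.List.getD_map_range _ _ _ _ hk,
      List.getD_eq_getElem _ _ (by simpa using hi), List.getElem_map]
    have : ¬ ((k, i) ∈ PySem.Set.empty) := List.not_mem_nil
    simp [this]

theorem pvComRelUpdate (S : List (List Char)) (k i j : Nat) (hk : k < pvT S)
    (hi : i < (pvBk S k).length) (hj : j < (pvBk S (k + 1)).length)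
    (com : List (List Nat)) (marked : PySem.Set (Nat × Nat))
    (h : pvComRel S com marked) :
    pvComRel S ((com.modify k (fun r => r.set i 1)).modify (k + 1) (fun r => r.set j 1))
      ((marked.add (k, i)).add (k + 1, j)) := by
  obtain ⟨hL, hRow, hVal⟩ := h
  have hkT : k < pvT S + 1 := by omega
  have hk1T : k + 1 < pvT S + 1 := by omega
  have hlen1 : k < com.length := by omega
  have hlen2 : k + 1 < (com.modify k (fun r => r.set i 1)).length := by
    rw [List.length_modify]; omega
  refine ⟨by simp [List.length_modify, hL], ?_, ?_⟩
  · intro k' hk'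
    rw [pvGetDModify _ (k + 1) _ hlen2 k' [], pvGetDModify _ k _ hlen1 k' []]
    by_cases h1 : k' = k + 1
    · subst h1
      rw [if_pos rfl, if_neg (by omega), List.length_set]
      exact hRow (k + 1) hk1T
    · by_cases h2 : k' = k
      · subst h2
        rw [if_neg h1, if_pos rfl, List.length_set]
        exact hRow k' hkT
      · rw [if_neg h1, if_neg h2]
        exact hRow k' hk'
  · intro k' i' d hk' hi'
    rw [pvGetDModify _ (k + 1) _ hlen2 k' [], pvGetDModify _ k _ hlen1 k' []]
    have hrowk : i < (com.getD k []).length := by rw [hRow k hkT]; exact hi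
    have hrowk1 : j < (com.getD (k + 1) []).length := by rw [hRow (k + 1) hk1T]; exact hj
    have hmem : ∀ q : Nat × Nat,
        (q ∈ (marked.add (k, i)).add (k + 1, j)) ↔
          (q ∈ marked ∨ q = (k, i) ∨ q = (k + 1, j)) := by
      intro q
      rw [PySem.Set.mem_add, PySem.Set.mem_add]
      tauto
    by_cases h1 : k' = k + 1
    · subst h1
      rw [if_pos rfl, if_neg (by omega), pvGetDSet _ _ _ hrowk1 i' d]
      by_cases hij : i' = j
      · subst hij
        rw [if_pos rfl, if_pos (by rw [hmem]; right; right; rfl)]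
      · rw [if_neg hij, hVal (k + 1) i' d hk' hi']
        have : ((k + 1, i') ∈ marked) ↔ ((k + 1, i') ∈ (marked.add (k, i)).add (k + 1, j)) := by
          rw [hmem]
          constructor
          · exact fun hq => Or.inl hq
          · rintro (hq | hq | hq)
            · exact hq
            · exact absurd (congrArg Prod.fst hq) (by simp)
            · exact absurd (congrArg Prod.snd hq) (by simpa using hij)
        by_cases hq : (k + 1, i') ∈ marked
        · rw [if_pos hq, if_pos (this.mp hq)]
        · rw [if_neg hq, if_neg (fun hq2 => hq (this.mpr hq2))]
    · by_cases h2 : k' = k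
      · subst h2
        rw [if_neg h1, if_pos rfl, pvGetDSet _ _ _ hrowk i' d]
        by_cases hij : i' = i
        · subst hij
          rw [if_pos rfl, if_pos (by rw [hmem]; right; left; rfl)]
        · rw [if_neg hij, hVal k' i' d hk' hi']
          have : ((k', i') ∈ marked) ↔ ((k', i') ∈ (marked.add (k', i)).add (k' + 1, j)) := by
            rw [hmem]
            constructor
            · exact fun hq => Or.inl hq
            · rintro (hq | hq | hq)
              · exact hq
              · exact absurd (congrArg Prod.snd hq) (by simpa using hij)
              · exact absurd (congrArg Prod.fst hq) (by simp)
          by_cases hq : (k', i') ∈ marked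
          · rw [if_pos hq, if_pos (this.mp hq)]
          · rw [if_neg hq, if_neg (fun hq2 => hq (this.mpr hq2))]
      · rw [if_neg h1, if_neg h2, hVal k' i' d hk' hi']
        have : ((k', i') ∈ marked) ↔ ((k', i') ∈ (marked.add (k, i)).add (k + 1, j)) := by
          rw [hmem]
          constructor
          · exact fun hq => Or.inl hq
          · rintro (hq | hq | hq)
            · exact hq
            · exact absurd (congrArg Prod.fst hq) (by simpa using h2)
            · exact absurd (congrArg Prod.fst hq) (by simpa using h1)
        by_cases hq : (k', i') ∈ marked
        · rw [if_pos hq, if_pos (this.mp hq)]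
        · rw [if_neg hq, if_neg (fun hq2 => hq (this.mpr hq2))]

theorem pvMemOfGetD (S : List (List Char)) (k i : Nat) (hi : i < (pvBk S k).length) :
    (pvBk S k).getD i [] ∈ S ∧ pvOnes ((pvBk S k).getD i []) = k := by
  have hmem : (pvBk S k).getD i [] ∈ pvBk S k := by
    rw [List.getD_eq_getElem _ _ hi]
    exact List.getElem_mem hi
  have := List.mem_filter.mp hmem
  exact ⟨this.1, by simpa using this.2⟩

theorem pvInnerStep (S : List (List Char))
    (H : ∀ x ∈ S, ∀ y ∈ S, pvOnes x + 1 = pvOnes y → x.length = y.length)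
    (k i j : Nat) (hk : k < pvT S)
    (hi : i < (pvBk S k).length) (hj : j < (pvBk S (k + 1)).length)
    (ca : List (List Nat) × List (List Char)) (cb : PySem.Set (Nat × Nat) × List (List Char))
    (hR : pvRel S ca cb) :
    pvRel S
      (if (pvCompare ((pvBk S k).getD i []) ((pvBk S (k + 1)).getD j [])).1 = 1 then
        ((ca.1.modify k (fun r => r.set i 1)).modify (k + 1) (fun r => r.set j 1),
         if (pvCompare ((pvBk S k).getD i []) ((pvBk S (k + 1)).getD j [])).2 ∈ ca.2 then ca.2
         else ca.2 ++ [(pvCompare ((pvBk S k).getD i []) ((pvBk S (k + 1)).getD j [])).2])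
      else ca)
      (if (pvDiffsB ((pvBk S k).getD i []) ((pvBk S (k + 1)).getD j [])).length = 1 then
        ((cb.1.add (k, i)).add (k + 1, j),
         if ((pvBk S k).getD i []).take
              ((pvDiffsB ((pvBk S k).getD i []) ((pvBk S (k + 1)).getD j [])).getD 0 0) ++
            '2' :: ((pvBk S k).getD i []).drop
              ((pvDiffsB ((pvBk S k).getD i []) ((pvBk S (k + 1)).getD j [])).getD 0 0 + 1) ∈ cb.2
         then cb.2
         else cb.2 ++ [((pvBk S k).getD i []).take
              ((pvDiffsB ((pvBk S k).getD i []) ((pvBk S (k + 1)).getD j [])).getD 0 0) ++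
            '2' :: ((pvBk S k).getD i []).drop
              ((pvDiffsB ((pvBk S k).getD i []) ((pvBk S (k + 1)).getD j [])).getD 0 0 + 1)])
      else cb) := by
  obtain ⟨hs, hos⟩ := pvMemOfGetD S k i hi
  obtain ⟨ht, hot⟩ := pvMemOfGetD S (k + 1) j hj
  have hlen : ((pvBk S k).getD i []).length = ((pvBk S (k + 1)).getD j []).length :=
    H _ hs _ ht (by omega)
  have hcnt := pvCntDiffs _ _ hlen
  by_cases hone : (pvDiffsB ((pvBk S k).getD i []) ((pvBk S (k + 1)).getD j [])).length = 1
  · obtain ⟨d, hd⟩ := List.length_eq_one_iff.mp hone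
    obtain ⟨hdlt, hpis⟩ := pvMergeEq _ _ hlen d hd
    rw [if_pos (by rw [hcnt]; exact hone), if_pos hone]
    have hm : ((pvBk S k).getD i []).take
          ((pvDiffsB ((pvBk S k).getD i []) ((pvBk S (k + 1)).getD j [])).getD 0 0) ++
        '2' :: ((pvBk S k).getD i []).drop
          ((pvDiffsB ((pvBk S k).getD i []) ((pvBk S (k + 1)).getD j [])).getD 0 0 + 1)
        = (pvCompare ((pvBk S k).getD i []) ((pvBk S (k + 1)).getD j [])).2 := by
      rw [hd, hpis]
      simp
    refine ⟨?_, ?_⟩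
    · show (if _ ∈ ca.2 then ca.2 else _) = _
      rw [hR.1, hm]
    · exact pvComRelUpdate S k i j hk hi hj ca.1 cb.1 hR.2
  · rw [if_neg (by rw [hcnt]; exact hone), if_neg hone]
    exact hR

-- B's bucket dict in terms of pvBk
theorem pvBkvB (S : List (List Char)) (k : Nat) : (pvBucketsB S).getD k [] = pvBk S k := by
  unfold pvBucketsB
  simp only [pvOnes_countB]
  rw [pvBkGetD S ⟨[]⟩ k]
  rfl

theorem pvKeysB (S : List (List Char)) :
    (pvBucketsB S).keys = PySem.Set.ofList (S.map pvOnes) := by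
  unfold pvBucketsB
  simp only [pvOnes_countB]
  rw [pvKeysFold S ⟨[]⟩, PySem.Set.ofList_eq_foldl]
  rfl

theorem pvContB (S : List (List Char)) (k : Nat) :
    ((pvBucketsB S).contains k = true) ↔ pvBk S k ≠ [] := by
  rw [pvDictContains, pvKeysB, PySem.Set.mem_ofList]
  constructor
  · intro hk
    obtain ⟨p, hp, hpk⟩ := List.mem_map.mp hk
    intro hnil
    have : p ∈ pvBk S k := List.mem_filter.mpr ⟨hp, by simp [hpk]⟩
    rw [hnil] at this
    exact absurd this List.not_mem_nil
  · intro hne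
    obtain ⟨p, hp⟩ := List.exists_mem_of_ne_nil _ hne
    have hm := List.mem_filter.mp hp
    exact List.mem_map.mpr ⟨p, hm.1, by simpa using hm.2⟩

theorem pvSortedB (S : List (List Char)) :
    PySem.List.sorted (pvBucketsB S).keys id
      = (List.range (pvT S + 1)).filter (fun k => pvPres S k) := by
  rw [pvKeysB, pvSortedKeys]
  exact List.filter_congr (fun k _ => rfl)

-- the triple comparison loops are coupled
theorem pvScanRel (S : List (List Char))
    (H : ∀ x ∈ S, ∀ y ∈ S, pvOnes x + 1 = pvOnes y → x.length = y.length) :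
    pvRel S
      (pvScanA ((List.range (pvT S + 1)).map (fun k => pvBk S k))
        ((List.range (pvT S + 1)).map (fun k => (pvBk S k).map (fun _ => 0))))
      (pvScanB (pvBucketsB S) (PySem.List.sorted (pvBucketsB S).keys id)) := by
  unfold pvScanA pvScanB
  rw [pvSortedB S]
  set tbl := (List.range (pvT S + 1)).map (fun k => pvBk S k) with htbl
  set com0 := (List.range (pvT S + 1)).map (fun k => (pvBk S k).map (fun _ => (0 : Nat)))
    with hcom0
  have htblget : ∀ k, k < pvT S + 1 → tbl.getD k [] = pvBk S k := fun k hk => by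
    rw [htbl]; exact PySem.List.getD_map_range _ _ _ _ hk
  have htbllen : tbl.length - 1 = pvT S := by rw [htbl]; simp
  rw [htbllen]
  have eA := pvFoldFilterId (fun k => pvPres S k && pvPres S (k + 1)) (List.range (pvT S))
    (fun (st : List (List Nat) × List (List Char)) a =>
      (List.range (tbl.getD a []).length).foldl (fun st i =>
        (List.range (tbl.getD (a + 1) []).length).foldl
          (fun (st : List (List Nat) × List (List Char)) j =>
            let twin := pvCompare ((tbl.getD a []).getD i []) ((tbl.getD (a + 1) []).getD j [])
            if twin.1 = 1 then
              ((st.1.modify a (fun r => r.set i 1)).modify (a + 1) (fun r => r.set j 1),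
               if twin.2 ∈ st.2 then st.2 else st.2 ++ [twin.2])
            else st) st) st)
    (by
      intro st k hkmem hp
      beta_reduce
      have hk : k < pvT S := List.mem_range.mp hkmem
      rcases Bool.and_eq_false_iff.mp hp with hpk | hpk
      · have hnil : pvBk S k = [] := by simpa [pvPres, List.isEmpty_iff] using hpk
        rw [htblget k (by omega), hnil]
        simp
      · have hnil : pvBk S (k + 1) = [] := by simpa [pvPres, List.isEmpty_iff] using hpk
        rw [htblget (k + 1) (by omega), hnil]
        simp only [List.length_nil, List.range_zero, List.foldl_nil]
        exact PySem.List.foldl_ignore _ _)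
    (com0, [])
  rw [eA]
  have eB := pvFoldFilterId (fun k => pvPres S (k + 1))
    ((List.range (pvT S + 1)).filter (fun k => pvPres S k))
    (fun (st : PySem.Set (Nat × Nat) × List (List Char)) k =>
      if (pvBucketsB S).contains (k + 1) then
        ((pvBucketsB S).getD k []).zipIdx.foldl (fun st si =>
          ((pvBucketsB S).getD (k + 1) []).zipIdx.foldl
            (fun (st : PySem.Set (Nat × Nat) × List (List Char)) tj =>
              let diffs := pvDiffsB si.1 tj.1
              if diffs.length = 1 then
                let m := si.1.take (diffs.getD 0 0) ++ '2' :: si.1.drop (diffs.getD 0 0 + 1)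
                (((st.1.add (k, si.2)).add (k + 1, tj.2)),
                 if m ∈ st.2 then st.2 else st.2 ++ [m])
              else st) st) st
      else st)
    (by
      intro st k _ hp
      beta_reduce
      have hnil : pvBk S (k + 1) = [] := by simpa [pvPres, List.isEmpty_iff] using hp
      rw [if_neg (fun hc => (pvContB S (k + 1)).mp hc hnil)])
    (PySem.Set.empty, [])
  rw [eB]
  have hKeq : ((List.range (pvT S + 1)).filter (fun k => pvPres S k)).filter
        (fun k => pvPres S (k + 1))
      = (List.range (pvT S)).filter (fun k => pvPres S k && pvPres S (k + 1)) := by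
    rw [List.filter_filter, List.range_succ, List.filter_append]
    have hTnil : pvBk S (pvT S + 1) = [] := List.filter_eq_nil_iff.mpr (fun p hp => by
      simp only [beq_iff_eq]
      have := pvOnesLeT S p hp
      omega)
    have h1 : List.filter (fun k => pvPres S (k + 1) && pvPres S k) [pvT S] = [] := by
      simp [pvPres, hTnil]
    rw [h1, List.append_nil]
    exact List.filter_congr (fun k hk => by rw [Bool.and_comm])
  rw [hKeq]
  refine pvFoldRel (pvRel S) _ _ _ ?_ _ _ ⟨rfl, pvComRelInit S⟩
  intro sa sb k hkK hR
  have hkmem := List.mem_filter.mp hkK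
  have hk : k < pvT S := List.mem_range.mp hkmem.1
  have hpres := hkmem.2
  have hpk : pvBk S k ≠ [] := by
    have := (Bool.and_eq_true_iff.mp hpres).1
    simpa [pvPres, List.isEmpty_iff] using this
  have hpk1 : pvBk S (k + 1) ≠ [] := by
    have := (Bool.and_eq_true_iff.mp hpres).2
    simpa [pvPres, List.isEmpty_iff] using this
  rw [htblget k (by omega), htblget (k + 1) (by omega)]
  rw [if_pos ((pvContB S (k + 1)).mpr hpk1), pvBkvB S k, pvBkvB S (k + 1)]
  rw [pvFoldZipIdx ([] : List Char) _ (pvBk S k) 0 sb]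
  simp only [Nat.add_zero]
  refine pvFoldRel (pvRel S) _ _ _ ?_ _ _ hR
  intro sa' sb' i himem hR'
  have hi : i < (pvBk S k).length := List.mem_range.mp himem
  show pvRel S _ ((pvBk S (k + 1)).zipIdx.foldl _ sb')
  rw [pvFoldZipIdx ([] : List Char) _ (pvBk S (k + 1)) 0 sb']
  simp only [Nat.add_zero]
  refine pvFoldRel (pvRel S) _ _ _ ?_ _ _ hR'
  intro sa'' sb'' j hjmem hR''
  have hj : j < (pvBk S (k + 1)).length := List.mem_range.mp hjmem
  exact pvInnerStep S H k i j hk hi hj sa'' sb'' hR''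

theorem pvFlatMapCongr {α β : Type} (f g : α → List β) :
    ∀ l : List α, (∀ a ∈ l, f a = g a) → l.flatMap f = l.flatMap g := by
  intro l h
  rw [List.flatMap_def, List.flatMap_def, List.map_congr_left h]

-- the collection loops agree on coupled states
theorem pvCollectEq (S : List (List Char)) (comf : List (List Nat))
    (marked : PySem.Set (Nat × Nat)) (hrel : pvComRel S comf marked) :
    pvCollectA ((List.range (pvT S + 1)).map (fun k => pvBk S k)) comf
      = pvCollectB (pvBucketsB S) (PySem.List.sorted (pvBucketsB S).keys id) marked := by
  obtain ⟨hL, hRow, hVal⟩ := hrel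
  unfold pvCollectA pvCollectB
  rw [pvSortedB S, hL]
  have hGA : ∀ (r : List (List Char)) i, i ∈ List.range (pvT S + 1) →
      (List.range (comf.getD i []).length).foldl (fun r j =>
        if (comf.getD i []).getD j 1 = 0 then
          r ++ [(((List.range (pvT S + 1)).map (fun k => pvBk S k)).getD i []).getD j []]
        else r) r
      = r ++ ((List.range (pvBk S i).length).filter
          (fun j => decide ((comf.getD i []).getD j 1 = 0))).map (fun j => (pvBk S i).getD j []) := by
    intro r i hi
    have hiT : i < pvT S + 1 := List.mem_range.mp hi
    rw [hRow i hiT, PySem.List.getD_map_range _ _ _ _ hiT]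
    exact (PySem.List.foldl_ite_eq_foldl_filter
        (p := fun j => (comf.getD i []).getD j 1 = 0)
        (fun (r : List (List Char)) j => r ++ [(pvBk S i).getD j []])
        (List.range (pvBk S i).length) r).trans
      (PySem.List.foldl_append_singleton_eq_map _ _ r)
  rw [PySem.List.foldl_congr_mem _ _
    (fun r i => r ++ ((List.range (pvBk S i).length).filter
      (fun j => decide ((comf.getD i []).getD j 1 = 0))).map (fun j => (pvBk S i).getD j []))
    _ (fun r i hi => hGA r i hi)]
  rw [PySem.List.foldl_append_eq_flatMap]
  have hGB : ∀ (r : List (List Char)) k,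
      k ∈ (List.range (pvT S + 1)).filter (fun k => pvPres S k) →
      ((pvBucketsB S).getD k []).zipIdx.foldl (fun r si =>
        if !(PySem.Set.contains marked (k, si.2)) then r ++ [si.1] else r) r
      = r ++ ((List.range (pvBk S k).length).filter
          (fun i => !(PySem.Set.contains marked (k, i)))).map (fun i => (pvBk S k).getD i []) := by
    intro r k _
    rw [pvBkvB S k, pvFoldZipIdx ([] : List Char) _ (pvBk S k) 0 r]
    simp only [Nat.add_zero]
    exact (PySem.List.foldl_ite_eq_foldl_filter
        (p := fun i => (!(PySem.Set.contains marked (k, i))) = true)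
        (fun (r : List (List Char)) i => r ++ [(pvBk S k).getD i []])
        (List.range (pvBk S k).length) r).trans
      ((PySem.List.foldl_append_singleton_eq_map _ _ r).trans (by
        congr 1
        congr 1
        apply List.filter_congr
        intro j _
        simp))
  rw [PySem.List.foldl_congr_mem _ _
    (fun r k => r ++ ((List.range (pvBk S k).length).filter
      (fun i => !(PySem.Set.contains marked (k, i)))).map (fun i => (pvBk S k).getD i []))
    _ (fun r k hk => hGB r k hk)]
  rw [PySem.List.foldl_append_eq_flatMap]
  simp only [List.nil_append]
  rw [pvFlatMapFilter (fun k => pvPres S k) _ (List.range (pvT S + 1)) (by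
    intro k _ hp
    have hnil : pvBk S k = [] := by simpa [pvPres, List.isEmpty_iff] using hp
    rw [hnil]
    simp)]
  apply pvFlatMapCongr
  intro k hk
  have hkT : k < pvT S + 1 := List.mem_range.mp (List.mem_filter.mp hk).1
  congr 1
  apply List.filter_congr
  intro j hj
  have hjlen : j < (pvBk S k).length := List.mem_range.mp hj
  have hv := hVal k j 1 hkT hjlen
  by_cases hm : (k, j) ∈ marked
  · have hc : PySem.Set.contains marked (k, j) = true := (PySem.Set.contains_iff _ _).mpr hm
    rw [hv, if_pos hm, hc]
    rfl
  · have hc : PySem.Set.contains marked (k, j) = false := by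
      cases hc : PySem.Set.contains marked (k, j)
      · rfl
      · exact absurd ((PySem.Set.contains_iff _ _).mp hc) hm
    rw [hv, if_neg hm, hc]
    rfl

theorem pvRound_eq (S : List (List Char))
    (H : ∀ x ∈ S, ∀ y ∈ S, pvOnes x + 1 = pvOnes y → x.length = y.length) :
    pvRoundA S = pvRoundB S := by
  have hlt : ∀ p ∈ S, pvOnes p < pvT S + 1 := fun p hp => by
    have := pvOnesLeT S p hp; omega
  have hmax : pvMaxA S = pvT S := by
    unfold pvMaxA
    simp only [pvOnes_loopA]
    rw [pvMxFold S 0]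
    simp
  have hinit : pvInitA (pvT S)
      = ((List.range (pvT S + 1)).map (fun _ => []),
         (List.range (pvT S + 1)).map (fun _ => [])) := by
    unfold pvInitA
    refine Prod.ext ?_ ?_
    · exact (PySem.List.foldl_append_singleton_eq_map
        (fun _ : Nat => ([] : List (List Char))) _ []).trans (by simp)
    · exact (PySem.List.foldl_append_singleton_eq_map
        (fun _ : Nat => ([] : List Nat)) _ []).trans (by simp)
  have hfill : pvFillA S (pvInitA (pvMaxA S))
      = ((List.range (pvT S + 1)).map (fun k => pvBk S k),
         (List.range (pvT S + 1)).map (fun k => (pvBk S k).map (fun _ => 0))) := by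
    rw [hmax, hinit]
    unfold pvFillA
    simp only [pvOnes_loopA]
    refine (PySem.List.foldl_prod_mk
      (f := fun (t : List (List (List Char))) p => t.modify (pvOnes p) (fun r => r ++ [p]))
      (g := fun (c : List (List Nat)) p => c.modify (pvOnes p) (fun r => r ++ [0]))
      S _ _).trans ?_
    refine Prod.ext ?_ ?_
    · exact (pvBuildFold (fun p => p) S (pvT S + 1) (fun _ => []) hlt).trans (by
        apply List.map_congr_left
        intro k _
        simp [pvBk])
    · exact (pvBuildFold (fun _ => (0 : Nat)) S (pvT S + 1) (fun _ => []) hlt).trans (by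
        apply List.map_congr_left
        intro k _
        simp [pvBk])
  have hscan := pvScanRel S H
  unfold pvRoundA pvRoundB
  rw [hfill]
  exact Prod.ext (pvCollectEq S _ _ hscan.2) hscan.1

theorem pvNxt_lengths (S : List (List Char)) (Hs : ∀ x ∈ S, ∀ y ∈ S, x.length = y.length) :
    ∀ m ∈ (pvRoundB S).2, ∃ x ∈ S, m.length = x.length := by
  simp only [pvRoundB]
  unfold pvScanB
  refine pvFoldInv
    (fun st : PySem.Set (Nat × Nat) × List (List Char) =>
      ∀ m ∈ st.2, ∃ x ∈ S, m.length = x.length)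
    _ _ ?_ _ (by simp)
  intro st k _ hInv
  beta_reduce
  by_cases hc : (pvBucketsB S).contains (k + 1) = true
  · rw [if_pos hc]
    refine pvFoldInv
      (fun st : PySem.Set (Nat × Nat) × List (List Char) =>
        ∀ m ∈ st.2, ∃ x ∈ S, m.length = x.length) _ _ ?_ _ hInv
    intro st' si hsi hInv'
    refine pvFoldInv
      (fun st : PySem.Set (Nat × Nat) × List (List Char) =>
        ∀ m ∈ st.2, ∃ x ∈ S, m.length = x.length) _ _ ?_ _ hInv'
    intro st'' tj htj hInv''
    have hsS : si.1 ∈ S := by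
      have h1 := List.fst_mem_of_mem_zipIdx hsi
      rw [pvBkvB S k] at h1
      exact (List.mem_filter.mp h1).1
    have htS : tj.1 ∈ S := by
      have h1 := List.fst_mem_of_mem_zipIdx htj
      rw [pvBkvB S (k + 1)] at h1
      exact (List.mem_filter.mp h1).1
    have hlen : si.1.length = tj.1.length := Hs si.1 hsS tj.1 htS
    show ∀ m ∈ (if (pvDiffsB si.1 tj.1).length = 1 then _ else st'').2, _
    by_cases hone : (pvDiffsB si.1 tj.1).length = 1
    · rw [if_pos hone]
      dsimp only
      obtain ⟨d, hd⟩ := List.length_eq_one_iff.mp hone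
      obtain ⟨hdlt, _⟩ := pvMergeEq si.1 tj.1 hlen d hd
      intro m hm
      by_cases hmem : si.1.take ((pvDiffsB si.1 tj.1).getD 0 0) ++
          '2' :: si.1.drop ((pvDiffsB si.1 tj.1).getD 0 0 + 1) ∈ st''.2
      · rw [if_pos hmem] at hm
        exact hInv'' m hm
      · rw [if_neg hmem] at hm
        rcases List.mem_append.mp hm with hm' | hm'
        · exact hInv'' m hm'
        · have hmv := List.mem_singleton.mp hm'
          refine ⟨si.1, hsS, ?_⟩
          rw [hmv, hd]
          simp only [List.getD_cons_zero]
          rw [List.length_append, List.length_cons, List.length_take, List.length_drop]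
          omega
    · rw [if_neg hone]
      exact hInv''
  · rw [if_neg hc]
    exact hInv

theorem pvNoadj_nxt (S : List (List Char))
    (Hn : ∀ x ∈ S, ∀ y ∈ S, pvOnes x + 1 ≠ pvOnes y) : (pvRoundB S).2 = [] := by
  simp only [pvRoundB]
  have hsc : pvScanB (pvBucketsB S) (PySem.List.sorted (pvBucketsB S).keys id)
      = (PySem.Set.empty, []) := by
    unfold pvScanB
    refine (PySem.List.foldl_congr_mem _ _ (fun st _ => st) _ ?_).trans
      (PySem.List.foldl_ignore _ _)
    intro acc k hk
    beta_reduce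
    rw [if_neg ?_]
    intro hc
    have hne1 : pvBk S (k + 1) ≠ [] := (pvContB S (k + 1)).mp hc
    obtain ⟨y, hy⟩ := List.exists_mem_of_ne_nil _ hne1
    have hym := List.mem_filter.mp hy
    rw [pvSortedB S] at hk
    have hkpres := (List.mem_filter.mp hk).2
    have hne0 : pvBk S k ≠ [] := by simpa [pvPres, List.isEmpty_iff] using hkpres
    obtain ⟨x, hx⟩ := List.exists_mem_of_ne_nil _ hne0
    have hxm := List.mem_filter.mp hx
    exact Hn x hxm.1 y hym.1 (by
      have h1 : pvOnes x = k := by simpa using hxm.2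
      have h2 : pvOnes y = k + 1 := by simpa using hym.2
      omega)
  rw [hsc]

theorem pvLoopB_nil (f : Nat) (acc : List (List Char)) : pvLoopB f acc [] = acc := by
  cases f <;> simp [pvLoopB]

theorem pvGo_eq (f : Nat) : ∀ (S acc : List (List Char)),
    ((∀ x ∈ S, ∀ y ∈ S, x.length = y.length) ∨ (∀ x ∈ S, ∀ y ∈ S, pvOnes x + 1 ≠ pvOnes y)) →
    acc ++ pvGoA f S = pvLoopB f acc S := by
  induction f with
  | zero => intro S acc _; simp [pvGoA, pvLoopB]
  | succ f ih =>
    intro S acc h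
    by_cases hS : S = []
    · subst hS
      have h0 : pvRoundA ([] : List (List Char)) = ([], []) := rfl
      simp [pvGoA, pvLoopB, h0]
    · have hH : ∀ x ∈ S, ∀ y ∈ S, pvOnes x + 1 = pvOnes y → x.length = y.length := by
        rcases h with h' | h'
        · exact fun x hx y hy _ => h' x hx y hy
        · exact fun x hx y hy he => absurd he (h' x hx y hy)
      have hr := pvRound_eq S hH
      have hloop : pvLoopB (f + 1) acc S = pvLoopB f (acc ++ (pvRoundB S).1) (pvRoundB S).2 := by
        simp [pvLoopB, hS]
      rw [hloop]
      rcases h with hsame | hnadj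
      · by_cases hn : (pvRoundB S).2 = []
        · rw [hn, pvLoopB_nil]
          simp [pvGoA, hr, hn]
        · have hlen : (pvRoundB S).2.length > 0 := by
            cases hcase : (pvRoundB S).2 with
            | nil => exact absurd hcase hn
            | cons a t => simp [hcase]
          have hnext : (∀ x ∈ (pvRoundB S).2, ∀ y ∈ (pvRoundB S).2, x.length = y.length) ∨
              (∀ x ∈ (pvRoundB S).2, ∀ y ∈ (pvRoundB S).2, pvOnes x + 1 ≠ pvOnes y) := by
            left
            intro m hm m' hm'
            obtain ⟨x, hx, hmx⟩ := pvNxt_lengths S hsame m hm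
            obtain ⟨x', hx', hmx'⟩ := pvNxt_lengths S hsame m' hm'
            rw [hmx, hmx', hsame x hx x' hx']
          have := ih (pvRoundB S).2 (acc ++ (pvRoundB S).1) hnext
          rw [← this]
          simp [pvGoA, hr, if_pos hlen]
      · have hn : (pvRoundB S).2 = [] := pvNoadj_nxt S hnadj
        rw [hn, pvLoopB_nil]
        simp [pvGoA, hr, hn]

-- ===== VERDICT (by name: the statement is the Claim_ definition above) =====
theorem findPI_spec : Claim_equal_findPI := by
  unfold Claim_equal_findPI
  intro bm _ hpre
  unfold Spec_findPI findPI findPI_alt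
  have hp : (∀ x ∈ bm.map String.toList, ∀ y ∈ bm.map String.toList, x.length = y.length) ∨
      (∀ x ∈ bm.map String.toList, ∀ y ∈ bm.map String.toList, pvOnes x + 1 ≠ pvOnes y) := by
    rcases hpre with h | h
    · left
      intro x hx y hy
      obtain ⟨s, hs, rfl⟩ := List.mem_map.mp hx
      obtain ⟨t, ht, rfl⟩ := List.mem_map.mp hy
      exact h s hs t ht
    · right
      intro x hx y hy
      obtain ⟨s, hs, rfl⟩ := List.mem_map.mp hx
      obtain ⟨t, ht, rfl⟩ := List.mem_map.mp hy
      exact h s hs t ht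
  have := pvGo_eq (pvFuel (bm.map String.toList)) (bm.map String.toList) [] hp
  simp only [List.nil_append] at this
  rw [this]
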